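-- pv_equiv track=rewrite | github.com/nlp-waseda/twitter-dialog-crawler | crawl.py | filter_dialog
-- ===== SOURCE A (Python) =====
-- def filter_dialog(full_texts, user_ids):
--     """一連のテキストとユーザIDをフィルタリングする。
--
--     :param full_texts: 一連のテキスト
--     :type full_texts: list
--     :param user_ids: 一連のユーザID
--     :type user_ids: list
--     :return: 一連のテキストとユーザIDが適切ならば`True`、そうでなければ`False`
--     :rtype: bool
--     """
--
--     # 発話が2個未満
--     if len(full_texts) < 2:
--         return False
--
--     # 話者が2人でない
--     if len(set(user_ids)) != 2:
--         return False
--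
--     # 発話が交互でない
--     if any(user_ids[i] == user_ids[i+1] for i in range(len(user_ids) - 1)):
--         return False
--
--     return True
-- ===== SOURCE B (Python) =====
-- def _alternates(a, b, rest):
--     expected, other = a, b
--     for x in rest:
--         if x != expected:
--             return False
--         expected, other = other, expected
--     return True
--
--
-- def filter_dialog(full_texts, user_ids):
--     if len(full_texts) < 2:
--         return False
--     if len(user_ids) < 2:
--         return False
--     a, b = user_ids[0], user_ids[1]
--     if a == b:
--         return False
--     return _alternates(a, b, user_ids[2:])
-- ===== Notes on version B (the rewrite author's own statement) =====
-- stated objective: simpler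
-- what changed: Replaces the distinct-count-via-set check plus the index-based adjacent-pair scan with a single structural recursion that walks the id list once, checking it strictly alternates between the first two (distinct) speakers.
import Mathlib
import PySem

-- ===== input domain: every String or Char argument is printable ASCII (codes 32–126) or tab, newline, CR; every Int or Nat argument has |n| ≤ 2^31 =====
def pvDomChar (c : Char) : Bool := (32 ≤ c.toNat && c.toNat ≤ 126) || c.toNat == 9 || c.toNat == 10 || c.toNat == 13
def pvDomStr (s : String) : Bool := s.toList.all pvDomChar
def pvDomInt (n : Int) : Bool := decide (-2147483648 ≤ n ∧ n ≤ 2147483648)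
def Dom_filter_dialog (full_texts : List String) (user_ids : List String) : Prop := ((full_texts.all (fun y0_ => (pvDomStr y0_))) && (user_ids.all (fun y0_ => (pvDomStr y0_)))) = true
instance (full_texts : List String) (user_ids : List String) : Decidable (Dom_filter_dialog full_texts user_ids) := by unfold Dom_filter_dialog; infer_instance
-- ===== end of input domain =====

-- B replaces A's set-distinct-count check plus index-based adjacent-pair scan with one
-- structural recursion checking the ids strictly alternate between the first two
-- (distinct) speakers (objective: simpler).

-- ===== PORT A =====
def filter_dialog (full_texts : List String) (user_ids : List String) : Bool :=
  if (full_texts.length : Int) < 2 then false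
  else if (PySem.Set.ofList user_ids).length ≠ 2 then false
  else if (PySem.List.pyRange 0 ((user_ids.length : Int) - 1) 1).any
      (fun i => PySem.List.pyGetD user_ids i "" == PySem.List.pyGetD user_ids (i + 1) "") then false
  else true

-- ===== PORT B =====
def pvAlternates (a b : String) : List String → Bool
  | [] => true
  | x :: rest => x == a && pvAlternates b a rest

def filter_dialog_alt (full_texts : List String) (user_ids : List String) : Bool :=
  if (full_texts.length : Int) < 2 then false
  else if (user_ids.length : Int) < 2 then false
  else
    match user_ids with
    | a :: b :: rest => if a == b then false else pvAlternates a b rest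
    | _ => false

-- ===== PRECONDITION & SPEC =====
def Spec_filter_dialog (full_texts : List String) (user_ids : List String) (out : Bool) : Prop := out = filter_dialog_alt full_texts user_ids
instance (full_texts : List String) (user_ids : List String) (out : Bool) : Decidable (Spec_filter_dialog full_texts user_ids out) := by unfold Spec_filter_dialog; infer_instance

-- ===== CLAIM (what is proved, stated in full; the proofs are below) =====
def Claim_equal_filter_dialog : Prop := ∀ (full_texts : List String) (user_ids : List String), Dom_filter_dialog full_texts user_ids → Spec_filter_dialog full_texts user_ids (filter_dialog full_texts user_ids)

-- ===== LEMMAS AND PROOFS =====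

-- A's any-over-range adjacent scan is true iff the list has two equal neighbours.
lemma anyAdj_true_iff (l : List String) :
    ((PySem.List.pyRange 0 ((l.length : Int) - 1) 1).any
      (fun i => PySem.List.pyGetD l i "" == PySem.List.pyGetD l (i + 1) "")) = true
    ↔ ¬ List.IsChain (· ≠ ·) l := by
  rw [List.any_eq_true]
  constructor
  · rintro ⟨i, hmem, hbeq⟩ hch
    rw [PySem.List.mem_pyRange_one] at hmem
    obtain ⟨h0, h1⟩ := hmem
    have hi1 : i.toNat + 1 < l.length := by omega
    have e1 : PySem.List.pyGetD l i "" = l[i.toNat] :=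
      PySem.List.pyGetD_eq_getElem l "" h0 (by omega)
    have e2 : PySem.List.pyGetD l (i + 1) "" = l[(i + 1).toNat] :=
      PySem.List.pyGetD_eq_getElem l "" (by omega) (by omega)
    have ht : (i + 1).toNat = i.toNat + 1 := by omega
    rw [e1, e2] at hbeq
    have heq : l[i.toNat] = l[(i + 1).toNat] := by simpa using hbeq
    exact (List.isChain_iff_getElem.mp hch i.toNat hi1) (by simpa [ht] using heq)
  · intro hch
    obtain ⟨n, hn, hR⟩ := List.exists_not_getElem_of_not_isChain hch
    refine ⟨(n : Int), ?_, ?_⟩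
    · rw [PySem.List.mem_pyRange_one]
      constructor <;> omega
    · have e1 : PySem.List.pyGetD l (n : Int) "" = l[((n : Int)).toNat] :=
        PySem.List.pyGetD_eq_getElem l "" (by omega) (by omega)
      have e2 : PySem.List.pyGetD l ((n : Int) + 1) "" = l[((n : Int) + 1).toNat] :=
        PySem.List.pyGetD_eq_getElem l "" (by omega) (by omega)
      have h1 : ((n : Int)).toNat = n := by omega
      have h2 : ((n : Int) + 1).toNat = n + 1 := by omega
      simp only [e1, e2, h1, h2, beq_iff_eq]
      exact not_not.mp (by simpa using hR)

-- every id accepted by the alternation check is one of the two speakers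
lemma alternates_mem : ∀ (rest : List String) (a b x : String),
    pvAlternates a b rest = true → x ∈ rest → x = a ∨ x = b
  | [], _, _, _, _, hx => absurd hx (List.not_mem_nil)
  | y :: rs, a, b, x, h, hx => by
    simp only [pvAlternates, Bool.and_eq_true, beq_iff_eq] at h
    rcases List.mem_cons.mp hx with rfl | hx'
    · exact Or.inl h.1
    · rcases alternates_mem rs b a x h.2 hx' with h' | h'
      · exact Or.inr h'
      · exact Or.inl h'

-- the alternation check implies there are no equal neighbours
lemma alternates_chain : ∀ (rest : List String) (a b : String), a ≠ b →
    pvAlternates a b rest = true → List.IsChain (· ≠ ·) (a :: b :: rest)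
  | [], a, b, hne, _ => by simp [List.isChain_cons_cons, hne]
  | x :: rs, a, b, hne, h => by
    simp only [pvAlternates, Bool.and_eq_true, beq_iff_eq] at h
    obtain ⟨rfl, h2⟩ := h
    have ih := alternates_chain rs b x hne.symm h2
    exact List.isChain_cons_cons.mpr ⟨hne, ih⟩

-- no equal neighbours and only the two speakers present implies alternation
lemma chain_two_alternates : ∀ (rest : List String) (a b : String), a ≠ b →
    (∀ x ∈ rest, x = a ∨ x = b) → List.IsChain (· ≠ ·) (b :: rest) →
    pvAlternates a b rest = true
  | [], _, _, _, _, _ => rfl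
  | x :: rs, a, b, hne, hmem, hch => by
    have hbx : b ≠ x := List.rel_of_isChain_cons_cons hch
    have hx : x = a := by
      rcases hmem x (List.mem_cons_self) with h | h
      · exact h
      · exact absurd h.symm hbx
    subst hx
    have hch' : List.IsChain (· ≠ ·) (x :: rs) := (List.isChain_cons_cons.mp hch).2
    simp only [pvAlternates, beq_self_eq_true, Bool.true_and]
    exact (chain_two_alternates rs b x hne.symm
      (fun y hy => (hmem y (List.mem_cons_of_mem _ hy)).symm) hch')

-- a deduplicated list whose members are exactly the two distinct speakers has length 2
lemma set_length_two (l : List String) (a b : String) (ha : a ∈ l) (hb : b ∈ l)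
    (hne : a ≠ b) (hmem : ∀ x ∈ l, x = a ∨ x = b) :
    (PySem.Set.ofList l).length = 2 := by
  have hnd : (PySem.Set.ofList l).Nodup := PySem.Set.nodup_ofList l
  have hfin : (PySem.Set.ofList l).toFinset = ({a, b} : Finset String) := by
    ext x
    simp only [List.mem_toFinset, PySem.Set.mem_ofList, Finset.mem_insert, Finset.mem_singleton]
    constructor
    · exact fun hx => hmem x hx
    · rintro (rfl | rfl) <;> assumption
  calc (PySem.Set.ofList l).length = (PySem.Set.ofList l).toFinset.card :=
        (List.toFinset_card_of_nodup hnd).symm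
    _ = 2 := by rw [hfin]; exact Finset.card_pair hne

-- from 'exactly two distinct values' we get the two-element shape of the dedup list
lemma mem_of_set_two (l : List String) (h2 : (PySem.Set.ofList l).length = 2)
    (a b : String) (ha : a ∈ l) (hb : b ∈ l) (hne : a ≠ b) :
    ∀ x ∈ l, x = a ∨ x = b := by
  obtain ⟨p, q, hpq⟩ := List.length_eq_two.mp h2
  have hmem : ∀ x, x ∈ l ↔ (x = p ∨ x = q) := by
    intro x
    rw [← PySem.Set.mem_ofList (xs := l), hpq]
    simp
  have hap := (hmem a).mp ha
  have hbp := (hmem b).mp hb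
  intro x hx
  have hxp := (hmem x).mp hx
  rcases hap with rfl | rfl <;> rcases hbp with rfl | rfl <;> tauto

-- ===== VERDICT (by name: the statement is the Claim_ definition above) =====
theorem filter_dialog_spec : Claim_equal_filter_dialog := by
  intro ft ui _
  unfold Spec_filter_dialog filter_dialog filter_dialog_alt
  by_cases hft : (ft.length : Int) < 2
  · simp [hft]
  · simp only [hft, if_false]
    match ui with
    | [] => simp [PySem.Set.ofList]
    | [x] => simp [PySem.Set.ofList, PySem.Set.add, PySem.Set.empty]
    | a :: b :: rest =>
      have hlen : ¬ ((((a :: b :: rest).length : Int)) < 2) := by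
        simp only [List.length_cons]; push_cast; omega
      simp only [hlen, if_false]
      by_cases hset : (PySem.Set.ofList (a :: b :: rest)).length = 2
      · simp only [hset, ne_eq, not_true_eq_false, if_false]
        by_cases hadj : List.IsChain (· ≠ ·) (a :: b :: rest)
        · have hany : ((PySem.List.pyRange 0 (((a :: b :: rest).length : Int) - 1) 1).any
              (fun i => PySem.List.pyGetD (a :: b :: rest) i "" ==
                PySem.List.pyGetD (a :: b :: rest) (i + 1) "")) = false := by
            rw [Bool.eq_false_iff, ne_eq, anyAdj_true_iff]; simp [hadj]
          have hab : a ≠ b := List.rel_of_isChain_cons_cons hadj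
          have hmem := mem_of_set_two (a :: b :: rest) hset a b
            (List.mem_cons_self) (List.mem_cons_of_mem _ List.mem_cons_self) hab
          have halt : pvAlternates a b rest = true :=
            chain_two_alternates rest a b hab
              (fun x hx => hmem x (List.mem_cons_of_mem _ (List.mem_cons_of_mem _ hx)))
              ((List.isChain_cons_cons.mp hadj).2)
          rw [hany]
          simp [halt, hab]
        · have hany := (anyAdj_true_iff (a :: b :: rest)).mpr hadj
          simp only [hany, if_true]
          by_cases hab : a = b
          · simp [hab]
          · rcases h : pvAlternates a b rest with _ | _
            · simp [hab]
            · exact absurd (alternates_chain rest a b hab h) hadj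
      · simp only [hset, ne_eq, not_false_eq_true, if_true]
        by_cases hab : a = b
        · simp [hab]
        · rcases h : pvAlternates a b rest with _ | _
          · simp [hab]
          · have hmem : ∀ x ∈ a :: b :: rest, x = a ∨ x = b := by
              intro x hx
              rcases List.mem_cons.mp hx with rfl | hx'
              · exact Or.inl rfl
              · rcases List.mem_cons.mp hx' with rfl | hx''
                · exact Or.inr rfl
                · exact alternates_mem rest a b x h hx''
            exact absurd (set_length_two (a :: b :: rest) a b
              (List.mem_cons_self) (List.mem_cons_of_mem _ List.mem_cons_self) hab hmem) hset
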